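-- pv_equiv track=rewrite | github.com/martinkostelnik/mzk-karticky | src/matching/index_search_bib.py | parse_bib_string
-- ===== SOURCE A (Python) =====
-- def parse_bib_string(bib_record: str) -> dict:
--     result = {}
--
--     lines = bib_record.split("\n")
--     lines = [line for line in lines if line]
--
--     for line in lines:
--         fields = line.split("\t")
--         label = fields[0]
--         assert label not in result.keys()
--         result[label] = fields[1:]
--
--     return result
-- ===== SOURCE B (Python) =====
-- def parse_bib_string(bib_record: str) -> dict:
--     # Single character-level scan: a small state machine over the characters,
--     # maintaining the current line's completed fields and the current field buffer;
--     # no split() calls at all.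
--     result = {}
--     fields = []
--     buf = ""
--     for ch in bib_record:
--         if ch == "\n":
--             fs = fields + [buf]
--             if fs != [""]:
--                 assert fs[0] not in result
--                 result[fs[0]] = fs[1:]
--             fields = []
--             buf = ""
--         elif ch == "\t":
--             fields.append(buf)
--             buf = ""
--         else:
--             buf += ch
--     fs = fields + [buf]
--     if fs != [""]:
--         assert fs[0] not in result
--         result[fs[0]] = fs[1:]
--     return result
-- ===== Notes on version B (the rewrite author's own statement) =====
-- stated objective: alternative
-- what changed: Replaces A's line-split and tab-split passes plus dict-building loop by a single character-level state machine that scans the string once, maintaining the current field buffer and the current line's completed fields, never calling split.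
import Mathlib
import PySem

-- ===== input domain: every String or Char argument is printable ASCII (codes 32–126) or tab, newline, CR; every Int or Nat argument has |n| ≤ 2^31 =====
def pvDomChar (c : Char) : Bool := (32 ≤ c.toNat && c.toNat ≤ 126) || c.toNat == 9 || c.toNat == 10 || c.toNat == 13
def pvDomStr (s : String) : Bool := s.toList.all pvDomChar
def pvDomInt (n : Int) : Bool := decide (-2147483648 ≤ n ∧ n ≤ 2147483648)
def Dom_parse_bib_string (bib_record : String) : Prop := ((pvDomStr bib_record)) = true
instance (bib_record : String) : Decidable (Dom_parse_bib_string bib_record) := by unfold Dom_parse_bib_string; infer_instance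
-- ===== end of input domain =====

-- B replaces A's split-by-newline / split-by-tab / dict loop by a single character-level
-- state machine scanning the string once (objective: alternative; return value only).


-- ===== PORT A =====
-- A: split into lines, drop empty lines, then one loop splitting each line on tabs and
-- inserting label ↦ rest into the dict (fields[0] never raises: str.split is non-empty).
def parse_bib_string (bib_record : String) : List (String × List String) :=
  let lines := (PySem.Str.split? bib_record "\n").getD []
  let lines := lines.filter (fun line => line != "")
  (lines.foldl (fun (result : PySem.Dict String (List String)) line =>
      result.insert (((PySem.Str.split? line "\t").getD []).headD "")
        ((PySem.Str.split? line "\t").getD []).tail)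
    PySem.Dict.empty).items

-- ===== PORT B =====
-- B: single pass over the characters; `buf` is the current field (a str in Source B, built by
-- buf += ch, hence List Char here), `fields` the current line's completed fields.
def pbFlush (d : PySem.Dict String (List String)) (fields : List String) (buf : List Char) :
    PySem.Dict String (List String) :=
  let fs := fields ++ [String.ofList buf]
  if fs ≠ [""] then d.insert (fs.headD "") fs.tail else d

def pbStep (st : PySem.Dict String (List String) × List String × List Char) (c : Char) :
    PySem.Dict String (List String) × List String × List Char :=
  if c = '\n' then (pbFlush st.1 st.2.1 st.2.2, [], [])
  else if c = '\t' then (st.1, st.2.1 ++ [String.ofList st.2.2], [])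
  else (st.1, st.2.1, st.2.2 ++ [c])

def parse_bib_string_alt (bib_record : String) : List (String × List String) :=
  let st := bib_record.toList.foldl pbStep (PySem.Dict.empty, [], [])
  (pbFlush st.1 st.2.1 st.2.2).items

-- ===== PRECONDITION & SPEC =====
-- Pre_ excludes records with a duplicated label, on which both A's and B's assert raise AssertionError.
def Pre_parse_bib_string (bib_record : String) : Prop :=
  (((((PySem.Str.split? bib_record "\n").getD []).filter (fun line => line != "")).map
      (fun line => ((PySem.Str.split? line "\t").getD []).headD "")).Nodup)
instance (bib_record : String) : Decidable (Pre_parse_bib_string bib_record) := by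
  unfold Pre_parse_bib_string; infer_instance

def pvWitness_parse_bib_string : String := "a\tb\tc\nx\ty"

def Spec_parse_bib_string (bib_record : String) (out : List (String × List String)) : Prop := out = parse_bib_string_alt bib_record
instance (bib_record : String) (out : List (String × List String)) : Decidable (Spec_parse_bib_string bib_record out) := by unfold Spec_parse_bib_string; infer_instance

-- ===== CLAIM (what is proved, stated in full; the proofs are below) =====
def Claim_equal_parse_bib_string : Prop := ∀ (bib_record : String), Dom_parse_bib_string bib_record → Pre_parse_bib_string bib_record → Spec_parse_bib_string bib_record (parse_bib_string bib_record)

-- ===== LEMMAS AND PROOFS =====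

-- structural split on a single character (proof-side mirror of str.split("\n")/("\t"))
def splitCh (a : Char) : List Char → List (List Char)
  | [] => [[]]
  | c :: cs =>
      if c = a then [] :: splitCh a cs
      else (c :: (splitCh a cs).headD []) :: (splitCh a cs).tail

theorem splitCh_ne_nil (a : Char) (l : List Char) : splitCh a l ≠ [] := by
  cases l with
  | nil => simp [splitCh]
  | cons c cs => by_cases h : c = a <;> simp [splitCh, h]

theorem cons_headD_tail {α : Type} {l : List α} (h : l ≠ []) (d : α) :
    l.headD d :: l.tail = l := by
  cases l with
  | nil => exact absurd rfl h
  | cons x xs => rfl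

theorem splitOn_go_single (a : Char) : ∀ (fuel : Nat) (l cur : List Char) (acc : List (List Char)),
    l.length ≤ fuel →
    PySem.Chars.splitOn.go [a] fuel l cur acc
      = acc.reverse ++ (cur.reverse ++ (splitCh a l).headD []) :: (splitCh a l).tail := by
  intro fuel
  induction fuel with
  | zero =>
    intro l cur acc hl
    have : l = [] := List.length_eq_zero_iff.mp (Nat.le_zero.mp hl)
    subst this
    rw [PySem.Chars.splitOn.go]
    simp [splitCh]
  | succ f ih =>
    intro l cur acc hl
    cases l with
    | nil =>
      rw [PySem.Chars.splitOn.go]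
      simp [splitCh]
      omega
    | cons c rest =>
      rw [PySem.Chars.splitOn.go]
      by_cases hc : a = c
      · subst hc
        simp only [List.isPrefixOf, BEq.rfl, Bool.true_and, if_pos, List.length_cons,
          List.length_nil, Nat.zero_add, List.drop_succ_cons, List.drop_zero]
        rw [ih rest [] (cur.reverse :: acc) (by simpa using Nat.le_of_succ_le_succ hl)]
        have hq := cons_headD_tail (splitCh_ne_nil a rest) ([] : List Char)
        simp only [splitCh, reduceIte, List.headD_cons, List.tail_cons, List.reverse_cons,
          List.reverse_nil, List.append_assoc, List.singleton_append, List.append_nil,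
          List.nil_append]
        rw [hq]
      · have hb : ([a].isPrefixOf (c :: rest)) = false := by
          simp [List.isPrefixOf]
          exact fun h => hc h
        simp only [hb, Bool.false_eq_true, if_false]
        rw [ih rest (c :: cur) acc (by simpa using Nat.le_of_succ_le_succ hl)]
        have hcne : c ≠ a := fun h => hc h.symm
        simp [splitCh, hcne]

theorem splitOn_single (a : Char) (l : List Char) :
    PySem.Chars.splitOn l [a] = splitCh a l := by
  unfold PySem.Chars.splitOn
  rw [splitOn_go_single a (l.length + 1) l [] [] (Nat.le_succ _)]
  simp only [List.reverse_nil, List.nil_append]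
  exact cons_headD_tail (splitCh_ne_nil a l) []

theorem splitCh_not_mem {a : Char} {l : List Char} (h : a ∉ l) : splitCh a l = [l] := by
  induction l with
  | nil => rfl
  | cons c cs ih =>
    have hca : c ≠ a := by intro hh; exact h (by simp [hh])
    have hrest : a ∉ cs := fun hm => h (List.mem_cons_of_mem _ hm)
    simp [splitCh, hca, ih hrest]

theorem splitCh_append_cons {a : Char} {u : List Char} (v : List Char) (h : a ∉ u) :
    splitCh a (u ++ a :: v) = u :: splitCh a v := by
  induction u with
  | nil => simp [splitCh]
  | cons c cs ih =>
    have hca : c ≠ a := by intro hh; exact h (by simp [hh])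
    have hrest : a ∉ cs := fun hm => h (List.mem_cons_of_mem _ hm)
    simp [splitCh, hca, ih hrest]

theorem ofList_eq_empty_iff (l : List Char) : String.ofList l = "" ↔ l = [] := by
  constructor
  · intro h; have := congrArg String.toList h; simpa using this
  · rintro rfl; rfl

-- per-line field list and insertion (shared normal form of both ports)
def lineFields (l : List Char) : List String := (splitCh '\t' l).map String.ofList

def insLine (d : PySem.Dict String (List String)) (fs : List String) :
    PySem.Dict String (List String) :=
  if fs ≠ [""] then d.insert (fs.headD "") fs.tail else d

theorem lineFields_eq_singleton_iff (l : List Char) : lineFields l = [""] ↔ l = [] := by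
  constructor
  · intro h
    unfold lineFields at h
    cases hs : splitCh '\t' l with
    | nil => exact absurd hs (splitCh_ne_nil _ _)
    | cons x xs =>
      rw [hs] at h
      simp only [List.map_cons, List.cons.injEq] at h
      obtain ⟨h1, h2⟩ := h
      have hx : x = [] := (ofList_eq_empty_iff x).mp h1
      have hxs : xs = [] := by simpa using h2
      subst hx; subst hxs
      cases l with
      | nil => rfl
      | cons c cs =>
        by_cases hc : c = '\t'
        · simp only [splitCh, if_pos hc, List.cons.injEq] at hs
          exact absurd hs.2 (splitCh_ne_nil _ _)
        · simp [splitCh, hc] at hs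
  · rintro rfl; rfl

-- A's normal form
theorem split?_getD_char (s : String) {a : Char} {sep : String} (hsep : sep.toList = [a]) :
    (PySem.Str.split? s sep).getD [] = (splitCh a s.toList).map String.ofList := by
  have hne : sep.toList.isEmpty = false := by rw [hsep]; rfl
  simp [PySem.Str.split?, PySem.Chars.split?, hsep, splitOn_single]

theorem A_norm (s : String) :
    parse_bib_string s
      = (((splitCh '\n' s.toList).filter (fun l => decide (l ≠ []))).foldl
          (fun d l => d.insert ((lineFields l).headD "") (lineFields l).tail)
          PySem.Dict.empty).items := by
  unfold parse_bib_string
  rw [split?_getD_char s (show ("\n" : String).toList = ['\n'] from rfl)]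
  dsimp only
  rw [List.filter_map, List.foldl_map]
  have hfilter : ((fun line => line != "") ∘ String.ofList) = fun l => decide (l ≠ []) := by
    funext l
    by_cases h : l = []
    · subst h; rfl
    · have hne : String.ofList l ≠ "" := fun hh => h ((ofList_eq_empty_iff l).mp hh)
      simp [Function.comp, bne, hne, h]
  rw [hfilter]
  have hfun : (fun (x : PySem.Dict String (List String)) (y : List Char) =>
      x.insert (((PySem.Str.split? (String.ofList y) "\t").getD []).headD "")
        ((PySem.Str.split? (String.ofList y) "\t").getD []).tail)
      = fun d l => d.insert ((lineFields l).headD "") (lineFields l).tail := by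
    funext d l
    rw [split?_getD_char (String.ofList l) (show ("\t" : String).toList = ['\t'] from rfl),
      String.toList_ofList]
    rfl
  rw [hfun]

theorem pbFlush_eq_insLine (d : PySem.Dict String (List String)) (fields : List String)
    (buf : List Char) : pbFlush d fields buf = insLine d (fields ++ [String.ofList buf]) := rfl

-- the scan invariant: running B's state machine over cs from an intermediate state
-- equals inserting the (partially started) first line then every further line of cs
theorem scan_main : ∀ (cs : List Char) (d : PySem.Dict String (List String))
    (fields : List String) (buf : List Char), '\t' ∉ buf → '\n' ∉ buf →
    pbFlush (cs.foldl pbStep (d, fields, buf)).1 (cs.foldl pbStep (d, fields, buf)).2.1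
        (cs.foldl pbStep (d, fields, buf)).2.2
      = ((splitCh '\n' cs).tail).foldl (fun d l => insLine d (lineFields l))
          (insLine d (fields ++ lineFields (buf ++ (splitCh '\n' cs).headD []))) := by
  intro cs
  induction cs with
  | nil =>
    intro d fields buf htab _
    have hb : lineFields buf = [String.ofList buf] := by
      simp [lineFields, splitCh_not_mem htab]
    simp only [List.foldl_nil, splitCh, List.tail_cons, List.headD_cons, List.append_nil, hb]
    rw [pbFlush_eq_insLine]
  | cons c cs ih =>
    intro d fields buf htab hnl
    obtain ⟨h, t, hS⟩ := List.exists_cons_of_ne_nil (splitCh_ne_nil '\n' cs)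
    by_cases hc : c = '\n'
    · subst hc
      have hb : lineFields buf = [String.ofList buf] := by
        simp [lineFields, splitCh_not_mem htab]
      simp only [List.foldl_cons, pbStep, reduceIte]
      rw [ih (pbFlush d fields buf) [] [] (by simp) (by simp)]
      rw [pbFlush_eq_insLine]
      simp only [splitCh, reduceIte, List.tail_cons, List.headD_cons]
      rw [hS]
      simp only [List.tail_cons, List.headD_cons, List.foldl_cons, List.nil_append,
        List.append_nil, hb]
    · by_cases hct : c = '\t'
      · subst hct
        have ht : lineFields (buf ++ '\t' :: h) = String.ofList buf :: lineFields h := by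
          simp [lineFields, splitCh_append_cons h htab]
        simp only [List.foldl_cons, pbStep, if_neg hc, reduceIte]
        rw [ih d (fields ++ [String.ofList buf]) [] (by simp) (by simp)]
        simp only [splitCh, if_neg hc, hS, List.tail_cons, List.headD_cons, List.nil_append, ht]
        simp
      · simp only [List.foldl_cons, pbStep, if_neg hc, if_neg hct]
        rw [ih d fields (buf ++ [c])
            (by simp only [List.mem_append, List.mem_singleton]
                rintro (hh | hh)
                exacts [htab hh, hct hh.symm])
            (by simp only [List.mem_append, List.mem_singleton]
                rintro (hh | hh)
                exacts [hnl hh, hc hh.symm])]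
        simp only [splitCh, if_neg hc, hS, List.tail_cons, List.headD_cons]
        rw [show (buf ++ [c]) ++ h = buf ++ c :: h by simp]

-- the two normal forms coincide: skipping [""]-lines IS filtering out empty lines
theorem bridge (L : List (List Char)) : ∀ (d : PySem.Dict String (List String)),
    L.foldl (fun d l => insLine d (lineFields l)) d
      = (L.filter (fun l => decide (l ≠ []))).foldl
          (fun d l => d.insert ((lineFields l).headD "") (lineFields l).tail) d := by
  induction L with
  | nil => intro d; rfl
  | cons l ls ih =>
    intro d
    by_cases hl : l = []
    · subst hl
      simp only [List.foldl_cons, List.filter_cons]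
      rw [show (insLine d (lineFields [])) = d by simp [insLine, lineFields, splitCh]]
      simp [ih]
    · have hfs : lineFields l ≠ [""] := fun hh => hl ((lineFields_eq_singleton_iff l).mp hh)
      simp only [List.foldl_cons, List.filter_cons, hl, decide_not, decide_false]
      rw [show insLine d (lineFields l)
            = d.insert ((lineFields l).headD "") (lineFields l).tail by
          simp [insLine, hfs]]
      simp [ih]

theorem B_norm (s : String) :
    parse_bib_string_alt s
      = ((splitCh '\n' s.toList).foldl (fun d l => insLine d (lineFields l))
          PySem.Dict.empty).items := by
  unfold parse_bib_string_alt
  dsimp only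
  rw [scan_main s.toList PySem.Dict.empty [] [] (by simp) (by simp)]
  obtain ⟨h, t, hS⟩ := List.exists_cons_of_ne_nil (splitCh_ne_nil '\n' s.toList)
  rw [hS]
  simp

-- ===== VERDICT (by name: the statement is the Claim_ definition above) =====
theorem parse_bib_string_spec : Claim_equal_parse_bib_string := by
  intro s _ _
  unfold Spec_parse_bib_string
  rw [A_norm, B_norm, bridge]
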